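-- pv_equiv track=rewrite | github.com/yukti-khanna/idr-sequence-predict | scripts/merge_fragments_to_regions.py | merge_starts
-- ===== SOURCE A (Python) =====
-- def merge_starts(starts: list[int], window: int) -> list[tuple[int, int, int]]:
--     """
--     Given sorted window start positions (1-based), merge overlapping windows of fixed length.
--     Returns list of (start, end, n_frags).
--     Overlap condition: next_start <= current_end (where end = start + window - 1)
--     """
--     starts = sorted(set(starts))
--     if not starts:
--         return []
--
--     regions = []
--     cur_start = starts[0]
--     cur_end = cur_start + window - 1
--     n = 1
--
--     for st in starts[1:]:
--         en = st + window - 1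
--         if st <= cur_end:   # overlaps (or touches if exactly equals)
--             cur_end = max(cur_end, en)
--             n += 1
--         else:
--             regions.append((cur_start, cur_end, n))
--             cur_start, cur_end, n = st, en, 1
--
--     regions.append((cur_start, cur_end, n))
--     return regions
-- ===== SOURCE B (Python) =====
-- def merge_starts(starts: list[int], window: int) -> list[tuple[int, int, int]]:
--     """Staged passes: first compute the break indices where a new region
--     begins, then read each region straight off consecutive break-index pairs."""
--     xs = sorted(set(starts))
--     if not xs:
--         return []
--     n = len(xs)
--     breaks = [0] + [i for i in range(1, n) if xs[i] - xs[i - 1] >= window] + [n]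
--     return [(xs[b], xs[e - 1] + window - 1, e - b)
--             for b, e in zip(breaks, breaks[1:])]
-- ===== Notes on version B (the rewrite author's own statement) =====
-- stated objective: alternative
-- what changed: Replaces A's single-pass merge with running state (cur_start, cur_end via max, count appended on close) by two staged passes: a comprehension computing the break indices where xs[i]-xs[i-1] >= window over the sorted distinct starts, then a zip over consecutive break pairs reading each region (xs[b], xs[e-1]+window-1, e-b) directly off the index pairs.
import Mathlib
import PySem

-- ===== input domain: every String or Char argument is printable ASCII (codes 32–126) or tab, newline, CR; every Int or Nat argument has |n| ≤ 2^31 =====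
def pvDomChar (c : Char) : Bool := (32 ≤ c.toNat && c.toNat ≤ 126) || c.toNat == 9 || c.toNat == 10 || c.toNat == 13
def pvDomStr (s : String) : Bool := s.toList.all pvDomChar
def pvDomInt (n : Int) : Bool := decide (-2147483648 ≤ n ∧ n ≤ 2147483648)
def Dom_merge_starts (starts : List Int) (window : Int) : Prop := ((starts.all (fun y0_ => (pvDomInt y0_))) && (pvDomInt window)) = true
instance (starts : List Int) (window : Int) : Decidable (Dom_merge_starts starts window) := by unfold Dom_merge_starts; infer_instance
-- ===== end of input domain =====

-- B replaces A's running-accumulator merge (cur_start/cur_end via max/count) with two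
-- staged passes: break-index detection, then reading each region off consecutive
-- break pairs; objective: alternative decomposition, same cost.

-- ===== PORT A =====
-- one iteration of A's for-loop over state (regions, cur_start, cur_end, n)
def mergeStepA (window : Int)
    (s : List (Int × Int × Int) × Int × Int × Int) (st : Int) :
    List (Int × Int × Int) × Int × Int × Int :=
  let en := st + window - 1
  if st ≤ s.2.2.1 then (s.1, s.2.1, max s.2.2.1 en, s.2.2.2 + 1)
  else (s.1 ++ [(s.2.1, s.2.2.1, s.2.2.2)], st, en, 1)

def merge_starts (starts : List Int) (window : Int) : List (Int × Int × Int) :=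
  -- starts = sorted(set(starts))
  match PySem.List.sorted (PySem.Set.ofList starts) (fun x => x) with
  | [] => []
  | x0 :: rest =>
    let s := rest.foldl (mergeStepA window) ([], x0, x0 + window - 1, 1)
    s.1 ++ [(s.2.1, s.2.2.1, s.2.2.2)]

-- ===== PORT B =====
-- [i for i in range(1, len(xs)) if xs[i] - xs[i-1] >= window]
-- (both indices are always in range, so pyGetD's default 0 is unreachable)
def brkList (window : Int) (xs : List Int) : List Int :=
  (PySem.List.pyRange 1 (xs.length : Int) 1).filter
    (fun i => decide (window ≤ PySem.List.pyGetD xs i 0 - PySem.List.pyGetD xs (i - 1) 0))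

-- (xs[b], xs[e - 1] + window - 1, e - b) for one pair (b, e) of the zip
def emitBE (window : Int) (xs : List Int) (be : Int × Int) : Int × Int × Int :=
  (PySem.List.pyGetD xs be.1 0, PySem.List.pyGetD xs (be.2 - 1) 0 + window - 1, be.2 - be.1)

-- the body of B after xs = sorted(set(starts))
def altB (window : Int) (xs : List Int) : List (Int × Int × Int) :=
  if xs = [] then []
  else
    let breaks := [(0 : Int)] ++ brkList window xs ++ [(xs.length : Int)]
    (breaks.zip breaks.tail).map (emitBE window xs)

def merge_starts_alt (starts : List Int) (window : Int) : List (Int × Int × Int) :=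
  altB window (PySem.List.sorted (PySem.Set.ofList starts) (fun x => x))

-- ===== PRECONDITION & SPEC =====
def Spec_merge_starts (starts : List Int) (window : Int) (out : List (Int × Int × Int)) : Prop := out = merge_starts_alt starts window
instance (starts : List Int) (window : Int) (out : List (Int × Int × Int)) : Decidable (Spec_merge_starts starts window out) := by unfold Spec_merge_starts; infer_instance

-- ===== CLAIM (what is proved, stated in full; the proofs are below) =====
def Claim_equal_merge_starts : Prop := ∀ (starts : List Int) (window : Int), Dom_merge_starts starts window → Spec_merge_starts starts window (merge_starts starts window)

-- ===== LEMMAS AND PROOFS =====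

-- proof-side: split the strictly increasing list into the first chain (gaps < w) and the rest
def split1 (w x : Int) : List Int → List Int × List Int
  | [] => ([], [])
  | y :: ys => if y - x < w then (y :: (split1 w y ys).1, (split1 w y ys).2) else ([], y :: ys)

lemma split1_snd_length_le (w x : Int) : ∀ ys : List Int, (split1 w x ys).2.length ≤ ys.length := by
  intro ys
  induction ys generalizing x with
  | nil => simp [split1]
  | cons y ys ih =>
    simp only [split1]
    split_ifs
    · exact Nat.le_succ_of_le (ih y)
    · simp

-- proof-side: the chunk decomposition both programs compute region-by-region
def chunks (w : Int) : List Int → List (List Int)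
  | [] => []
  | x :: ys => (x :: (split1 w x ys).1) :: chunks w (split1 w x ys).2
termination_by l => l.length
decreasing_by
  have := split1_snd_length_le w x ys
  simp
  omega

def emitC (w : Int) (g : List Int) : Int × Int × Int :=
  (g.headD 0, g.getLastD 0 + w - 1, (g.length : Int))

def regsOf (w : Int) (xs : List Int) : List (Int × Int × Int) :=
  (chunks w xs).map (emitC w)

lemma split1_spec (w : Int) : ∀ (ys : List Int) (x : Int), List.IsChain (· < ·) (x :: ys) →
    (split1 w x ys).1 ++ (split1 w x ys).2 = ys ∧
    List.IsChain (fun a b => b - a < w) (x :: (split1 w x ys).1) ∧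
    ((split1 w x ys).2 ≠ [] → w ≤ (split1 w x ys).2.headD 0 - (x :: (split1 w x ys).1).getLastD 0) ∧
    List.IsChain (· < ·) (split1 w x ys).2 := by
  intro ys
  induction ys with
  | nil => intro x _; simp [split1]
  | cons y ys ih =>
    intro x hch
    have hxy : x < y := (List.isChain_cons_cons.mp hch).1
    have hch' : List.IsChain (· < ·) (y :: ys) := (List.isChain_cons_cons.mp hch).2
    by_cases hc : y - x < w
    · obtain ⟨h1, h2, h3, h4⟩ := ih y hch'
      simp only [split1, if_pos hc]
      refine ⟨by simpa using h1, List.isChain_cons_cons.mpr ⟨hc, h2⟩, ?_, h4⟩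
      intro hr
      simpa using h3 hr
    · refine ⟨?_, ?_, ?_, ?_⟩ <;> simp only [split1, if_neg hc]
      · simp
      · simp
      · intro _; simp; omega
      · exact hch'

-- ===== A side: the fold equals the chunk regions =====

def finA (s : List (Int × Int × Int) × Int × Int × Int) : List (Int × Int × Int) :=
  s.1 ++ [(s.2.1, s.2.2.1, s.2.2.2)]

lemma accA (w : Int) : ∀ (rest : List Int) (acc : List (Int × Int × Int)) (st : Int × Int × Int),
    rest.foldl (mergeStepA w) (acc, st) =
      (acc ++ (rest.foldl (mergeStepA w) (([] : List (Int × Int × Int)), st)).1,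
       (rest.foldl (mergeStepA w) (([] : List (Int × Int × Int)), st)).2) := by
  intro rest
  induction rest with
  | nil => intro acc st; simp
  | cons y rest ih =>
    intro acc st
    have hstep : ∀ (a : List (Int × Int × Int)) (s : Int × Int × Int),
        mergeStepA w (a, s) y = (a ++ (mergeStepA w ([], s) y).1, (mergeStepA w ([], s) y).2) := by
      intro a s
      simp only [mergeStepA]
      split_ifs <;> simp
    simp only [List.foldl_cons, hstep acc st]
    rw [ih (acc ++ (mergeStepA w ([], st) y).1) (mergeStepA w ([], st) y).2]
    conv_rhs => rw [show mergeStepA w ([], st) y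
      = ((mergeStepA w ([], st) y).1, (mergeStepA w ([], st) y).2) from rfl,
      ih (mergeStepA w ([], st) y).1 (mergeStepA w ([], st) y).2]
    simp [List.append_assoc]

lemma A1 (w : Int) : ∀ (rest : List Int) (x cs n : Int), List.IsChain (· < ·) (x :: rest) →
    finA (rest.foldl (mergeStepA w) (([] : List (Int × Int × Int)), cs, x + w - 1, n)) =
    (cs, (x :: (split1 w x rest).1).getLastD 0 + w - 1, n + ((split1 w x rest).1.length : Int))
      :: regsOf w (split1 w x rest).2 := by
  intro rest
  induction rest with
  | nil => intro x cs n _; simp [split1, regsOf, chunks, finA]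
  | cons y rest ih =>
    intro x cs n hch
    have hxy : x < y := (List.isChain_cons_cons.mp hch).1
    have hch' := (List.isChain_cons_cons.mp hch).2
    by_cases hc : y - x < w
    · have hstep : mergeStepA w ([], cs, x + w - 1, n) y = ([], cs, y + w - 1, n + 1) := by
        simp only [mergeStepA]
        rw [if_pos (by omega : y ≤ x + w - 1)]
        simp [max_eq_right (by omega : x + w - 1 ≤ y + w - 1)]
      simp only [List.foldl_cons, hstep]
      rw [ih y cs (n + 1) hch']
      simp only [split1, if_pos hc]
      refine List.cons_eq_cons.mpr ⟨?_, rfl⟩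
      simp
      ring
    · have hstep : mergeStepA w ([], cs, x + w - 1, n) y = ([(cs, x + w - 1, n)], y, y + w - 1, 1) := by
        simp only [mergeStepA]
        rw [if_neg (by omega : ¬ y ≤ x + w - 1)]
        simp
      simp only [List.foldl_cons, hstep]
      rw [accA w rest [(cs, x + w - 1, n)] (y, y + w - 1, 1)]
      have hih := ih y y 1 hch'
      simp only [finA] at hih ⊢
      simp only [List.cons_append, List.nil_append]
      rw [hih]
      simp only [split1, if_neg hc]
      simp [regsOf, chunks, emitC]
      ring

-- ===== B side: index lemmas =====

lemma getD_append_left (u v : List Int) (i : Int) (h0 : 0 ≤ i) (h1 : i < (u.length : Int)) :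
    PySem.List.pyGetD (u ++ v) i 0 = PySem.List.pyGetD u i 0 := by
  lift i to ℕ using h0 with n
  simp only [PySem.List.pyGetD_natCast]
  rw [List.getD_append]
  omega

lemma getD_append_right (u v : List Int) (j : Int) (h0 : 0 ≤ j) :
    PySem.List.pyGetD (u ++ v) ((u.length : Int) + j) 0 = PySem.List.pyGetD v j 0 := by
  lift j to ℕ using h0 with m
  have h : ((u.length : Int) + (m : Int)) = ((u.length + m : Nat) : Int) := by push_cast; ring
  rw [h]
  simp only [PySem.List.pyGetD_natCast]
  rw [List.getD_eq_getElem?_getD, List.getD_eq_getElem?_getD,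
    List.getElem?_append_right (by omega)]
  congr 2
  omega

lemma getD_last (u : List Int) (hu : u ≠ []) :
    PySem.List.pyGetD u ((u.length : Int) - 1) 0 = u.getLastD 0 := by
  have h1 : 1 ≤ u.length := List.length_pos_iff.mpr hu
  have h : ((u.length : Int) - 1) = ((u.length - 1 : Nat) : Int) := by omega
  rw [h]
  simp only [PySem.List.pyGetD_natCast]
  rw [List.getD_eq_getElem?_getD, List.getLastD_eq_getLast?, List.getLast?_eq_getElem?]

lemma pyRange_shift (a b k : Int) :
    PySem.List.pyRange (a + k) (b + k) 1 = (PySem.List.pyRange a b 1).map (· + k) := by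
  have h : b + k - (a + k) = b - a := by ring
  rw [PySem.List.pyRange_one, PySem.List.pyRange_one, h, List.map_map]
  refine List.map_congr_left ?_
  intro i _
  simp [Function.comp]
  ring

lemma getD_headD (u : List Int) : PySem.List.pyGetD u 0 0 = u.headD 0 := by
  cases u <;> simp [PySem.List.pyGetD_zero]

lemma gap_lt (w : Int) (u : List Int) (hg : List.IsChain (fun a b => b - a < w) u)
    (i : Int) (h1 : 1 ≤ i) (h2 : i < (u.length : Int)) :
    PySem.List.pyGetD u i 0 - PySem.List.pyGetD u (i - 1) 0 < w := by
  rw [PySem.List.pyGetD_eq_getElem u 0 (by omega) h2,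
      PySem.List.pyGetD_eq_getElem u 0 (by omega) (by omega)]
  have hidx : i.toNat = (i - 1).toNat + 1 := by omega
  have := (List.isChain_iff_getElem.mp hg) (i - 1).toNat (by omega)
  simp only [hidx]
  exact this

lemma mem_brk (w : Int) (xs : List Int) (i : Int) (h : i ∈ brkList w xs) :
    1 ≤ i ∧ i < (xs.length : Int) := by
  have := List.mem_filter.mp h
  have hm := PySem.List.mem_pyRange_one.mp this.1
  exact hm

lemma brk_decomp' (w : Int) (u r : List Int) (hu : u ≠ [])
    (hgap : List.IsChain (fun a b => b - a < w) u)
    (hbnd : r ≠ [] → w ≤ r.headD 0 - u.getLastD 0) :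
    brkList w (u ++ r) =
      if r = [] then []
      else (u.length : Int) :: (brkList w r).map (· + (u.length : Int)) := by
  have hk1 : 1 ≤ u.length := List.length_pos_iff.mpr hu
  have hlen : ((u ++ r).length : Int) = (u.length : Int) + (r.length : Int) := by
    simp
  have hsplit : PySem.List.pyRange 1 ((u ++ r).length : Int) 1
      = PySem.List.pyRange 1 (u.length : Int) 1
        ++ PySem.List.pyRange (u.length : Int) ((u ++ r).length : Int) 1 := by
    refine PySem.List.pyRange_one_append 1 (u.length : Int) ((u ++ r).length : Int)
      (by exact_mod_cast hk1) (by rw [hlen]; omega)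
  have hfilter1 : (PySem.List.pyRange 1 (u.length : Int) 1).filter
      (fun i => decide (w ≤ PySem.List.pyGetD (u ++ r) i 0
        - PySem.List.pyGetD (u ++ r) (i - 1) 0)) = [] := by
    rw [List.filter_eq_nil_iff]
    intro i hi
    have hm := PySem.List.mem_pyRange_one.mp hi
    have hl : PySem.List.pyGetD (u ++ r) i 0 = PySem.List.pyGetD u i 0 :=
      getD_append_left u r i (by omega) hm.2
    have hl' : PySem.List.pyGetD (u ++ r) (i - 1) 0 = PySem.List.pyGetD u (i - 1) 0 :=
      getD_append_left u r (i - 1) (by omega) (by omega)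
    simp only [hl, hl', decide_eq_true_eq]
    have := gap_lt w u hgap i hm.1 hm.2
    omega
  unfold brkList
  rw [hsplit, List.filter_append, hfilter1, List.nil_append]
  by_cases hr : r = []
  · subst hr
    rw [if_pos rfl, PySem.List.pyRange_one_eq_nil (by simp), List.filter_nil]
  · rw [if_neg hr]
    have hr1 : 1 ≤ r.length := List.length_pos_iff.mpr hr
    have hcons : PySem.List.pyRange (u.length : Int) ((u ++ r).length : Int) 1
        = (u.length : Int) :: PySem.List.pyRange ((u.length : Int) + 1) ((u ++ r).length : Int) 1 :=
      PySem.List.pyRange_one_cons (by rw [hlen]; omega)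
    rw [hcons]
    have hgk : (decide (w ≤ PySem.List.pyGetD (u ++ r) (u.length : Int) 0
        - PySem.List.pyGetD (u ++ r) ((u.length : Int) - 1) 0)) = true := by
      have h1 : PySem.List.pyGetD (u ++ r) (u.length : Int) 0 = r.headD 0 := by
        have := getD_append_right u r 0 le_rfl
        simpa [getD_headD] using this
      have h2 : PySem.List.pyGetD (u ++ r) ((u.length : Int) - 1) 0 = u.getLastD 0 := by
        rw [getD_append_left u r _ (by omega) (by omega)]
        exact getD_last u hu
      simp only [h1, h2, decide_eq_true_eq]
      exact hbnd hr
    rw [List.filter_cons]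
    simp only [hgk, if_pos]
    have hshift : PySem.List.pyRange ((u.length : Int) + 1) ((u ++ r).length : Int) 1
        = (PySem.List.pyRange 1 (r.length : Int) 1).map (· + (u.length : Int)) := by
      have h1 : (u.length : Int) + 1 = 1 + (u.length : Int) := by ring
      have h2 : ((u ++ r).length : Int) = (r.length : Int) + (u.length : Int) := by
        rw [hlen]; ring
      rw [h1, h2]
      exact pyRange_shift 1 (r.length : Int) (u.length : Int)
    rw [hshift, List.filter_map]
    refine congrArg _ (congrArg _ (List.filter_congr ?_))
    intro i hi
    have hm := PySem.List.mem_pyRange_one.mp hi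
    have e1 : PySem.List.pyGetD (u ++ r) (i + (u.length : Int)) 0 = PySem.List.pyGetD r i 0 := by
      have := getD_append_right u r i (by omega)
      rw [← this]; ring_nf
    have e2 : PySem.List.pyGetD (u ++ r) (i + (u.length : Int) - 1) 0
        = PySem.List.pyGetD r (i - 1) 0 := by
      have := getD_append_right u r (i - 1) (by omega)
      rw [← this]; ring_nf
    simp only [Function.comp]
    rw [e1, e2]

lemma altB_ne (w : Int) (xs : List Int) (h : xs ≠ []) :
    altB w xs = (((0 : Int) :: (brkList w xs ++ [(xs.length : Int)])).zip
      (brkList w xs ++ [(xs.length : Int)])).map (emitBE w xs) := by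
  simp [altB, h]

lemma emit_first (w : Int) (u r : List Int) (hu : u ≠ []) :
    emitBE w (u ++ r) (0, (u.length : Int)) = emitC w u := by
  have hk1 : 1 ≤ u.length := List.length_pos_iff.mpr hu
  unfold emitBE emitC
  have h0 : PySem.List.pyGetD (u ++ r) 0 0 = u.headD 0 := by
    rw [getD_append_left u r 0 le_rfl (by omega)]
    exact getD_headD u
  have h1 : PySem.List.pyGetD (u ++ r) ((u.length : Int) - 1) 0 = u.getLastD 0 := by
    rw [getD_append_left u r _ (by omega) (by omega)]
    exact getD_last u hu
  simp [h0, h1]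

lemma emit_shift (w : Int) (u r : List Int) (b e : Int) (hb : 0 ≤ b) (he : 1 ≤ e) :
    emitBE w (u ++ r) (b + (u.length : Int), e + (u.length : Int)) = emitBE w r (b, e) := by
  unfold emitBE
  have e1 : PySem.List.pyGetD (u ++ r) (b + (u.length : Int)) 0 = PySem.List.pyGetD r b 0 := by
    have := getD_append_right u r b hb
    rw [← this]; ring_nf
  have e2 : PySem.List.pyGetD (u ++ r) (e + (u.length : Int) - 1) 0
      = PySem.List.pyGetD r (e - 1) 0 := by
    have := getD_append_right u r (e - 1) (by omega)
    rw [← this]; ring_nf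
  simp only [e1, e2]
  refine Prod.ext rfl (Prod.ext rfl ?_)
  simp

lemma B1 (w : Int) : ∀ (xs : List Int), List.IsChain (· < ·) xs → altB w xs = regsOf w xs := by
  intro xs
  induction xs using chunks.induct w with
  | case1 => intro _; simp [altB, regsOf, chunks]
  | case2 x ys ih =>
    intro hch
    obtain ⟨happ, hgap, hbnd, hchr⟩ := split1_spec w ys x hch
    have hxs : x :: ys = (x :: (split1 w x ys).1) ++ (split1 w x ys).2 := by
      rw [List.cons_append, happ]
    have hu : (x :: (split1 w x ys).1) ≠ [] := by simp
    have hbrk := brk_decomp' w (x :: (split1 w x ys).1) (split1 w x ys).2 hu hgap hbnd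
    have hregs : regsOf w (x :: ys)
        = emitC w (x :: (split1 w x ys).1) :: regsOf w (split1 w x ys).2 := by
      simp [regsOf, chunks]
    rw [show altB w (x :: ys) = altB w ((x :: (split1 w x ys).1) ++ (split1 w x ys).2) from by
      rw [← hxs], hregs]
    by_cases hr : (split1 w x ys).2 = []
    · rw [hr] at hbrk ⊢
      rw [if_pos rfl] at hbrk
      simp only [List.append_nil] at hbrk ⊢
      unfold altB
      rw [if_neg (by simp)]
      have hef := emit_first w (x :: (split1 w x ys).1) [] hu
      simp only [List.append_nil] at hef
      simp only [regsOf, chunks]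
      simp [List.zip, hbrk]
      simpa using hef
    · rw [if_neg hr] at hbrk
      have hr1 : 1 ≤ (split1 w x ys).2.length := List.length_pos_iff.mpr hr
      rw [altB_ne w _ (by simp), ← ih hchr, altB_ne w _ hr]
      set k : Int := ((x :: (split1 w x ys).1).length : Int) with hkdef
      set Tr : List Int := brkList w (split1 w x ys).2 ++ [((split1 w x ys).2.length : Int)]
        with hTrdef
      have hk : (((x :: (split1 w x ys).1) ++ (split1 w x ys).2).length : Int)
          = ((split1 w x ys).2.length : Int) + k := by
        rw [hkdef]; push_cast [List.length_append]; ring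
      have hT : brkList w ((x :: (split1 w x ys).1) ++ (split1 w x ys).2)
            ++ [(((x :: (split1 w x ys).1) ++ (split1 w x ys).2).length : Int)]
          = ((0 : Int) :: Tr).map (· + k) := by
        rw [hbrk, hk, hTrdef]
        simp
      rw [hT]
      have hzip : ((0 : Int) :: (((0 : Int) :: Tr).map (· + k))).zip (((0 : Int) :: Tr).map (· + k))
          = ((0 : Int), 0 + k) :: (((0 : Int) :: Tr).zip Tr).map (Prod.map (· + k) (· + k)) := by
        have h1 : ((0 : Int) :: Tr).map (· + k) = (0 + k) :: Tr.map (· + k) := by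
          simp only [List.map_cons]
        rw [h1, List.zip_cons_cons, ← h1, List.zip_map]
      rw [hzip, List.map_cons]
      refine List.cons_eq_cons.mpr ⟨?_, ?_⟩
      · have hef := emit_first w (x :: (split1 w x ys).1) (split1 w x ys).2 hu
        rw [← hkdef] at hef
        simpa using hef
      · rw [List.map_map]
        refine List.map_congr_left ?_
        rintro ⟨b, e⟩ hbe
        obtain ⟨hb, he⟩ := List.of_mem_zip hbe
        have hb0 : 0 ≤ b := by
          rcases List.mem_cons.mp hb with h | h
          · omega
          · rw [hTrdef] at h
            rcases List.mem_append.mp h with h | h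
            · have := mem_brk w _ _ h; omega
            · simp at h; omega
        have he1 : 1 ≤ e := by
          rw [hTrdef] at he
          rcases List.mem_append.mp he with h | h
          · exact (mem_brk w _ _ h).1
          · simp at h; omega
        have hes := emit_shift w (x :: (split1 w x ys).1) (split1 w x ys).2 b e hb0 he1
        rw [← hkdef] at hes
        simpa [Prod.map] using hes

-- ===== VERDICT (by name: the statement is the Claim_ definition above) =====
theorem merge_starts_spec : Claim_equal_merge_starts := by
  intro starts window _
  unfold Spec_merge_starts merge_starts merge_starts_alt
  have hpw := PySem.List.sorted_ofList_pairwise_lt (κ := Int) starts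
  rw [B1 window _ hpw.isChain]
  cases hxs : PySem.List.sorted (PySem.Set.ofList starts) (fun x => x) with
  | nil => simp [regsOf, chunks]
  | cons x0 rest =>
    rw [hxs] at hpw
    have hA := A1 window rest x0 x0 1 hpw.isChain
    show finA (rest.foldl (mergeStepA window) ([], x0, x0 + window - 1, 1))
      = regsOf window (x0 :: rest)
    rw [hA]
    simp [regsOf, chunks, emitC]
    ring
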